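-- pv_equiv track=rewrite | github.com/MDU-PHL/troika | troika_tb/utils/collate.py | calculate_resistance
-- ===== SOURCE A (Python) =====
-- def calculate_resistance(drugs_dict):
--     '''
--     based on WHO criteria for TB resistance categories
--     No drug resistance predicted = no mutations in first line drugs
--     Mono-resistance predicted =resistance in one of rif, inh, emb or pza
--     Poly-resistance predicted  = two or more resisance where both rif and inh are not included
--     Multi-drug resistance predicted = rif and inh resistance plus or minus emb and pza
--     Extensive drug-resistance predicted rif and inh AND a flouroquinolone AND one of amikacin/capreomycin/kanamycin/sm #TODO add Streptomycin to logic
--     '''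
--     # list of drigs in flq or ack for xdr
--     flqlist = ['Fluoroquinolones','Levofloxacin','Moxifloxacin','Ofloxacin','Ciprofloxacin']
--     ackslist = ['Amikacin', 'Capreomycin', 'Kanamycin', 'Streptomycin']
--     # initialise score
--     score = 0
--     # initialise flq and ack values
--     flq = False
--     ack = False
--     # generate values for resistance call
--     for d in drugs_dict:
--         if drugs_dict[d] != 'No mutation detected':
--             if d in flqlist:
--                 flq = True
--             elif d in ackslist:
--                 ack = True
--             elif d in ['Rifampicin', 'Isoniazid']:
--                 score = score + 3
--             elif d in ['Pyrazinamide', 'Ethambutol']: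
--                 score = score + 1
--
--     # initialise the resistance to default
--     resistance = 'No drug resistance predicted'
--     if score == 1 or score == 3: # one first line drug
--         resistance = 'Mono-resistance predicted'
--     elif score == 2 or score in range(4,6): # more than one first line drug where INH OR RIF can be present
--         resistance = 'Poly-resistance predicted'
--     elif score in range(6,9): # RIF and INH +/- PZA or EMB
--         if flq and ack: # there are mutations in a FLQ and amikacin,capreomycin,kanamycin
--             resistance = 'Extensive drug-resistance predicted'
--         else:
--             resistance = 'Multi-drug resistance predicted'
--
--     return resistance
-- ===== SOURCE B (Python) =====
-- def calculate_resistance(drugs_dict):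
--     resistant = {d for d, v in drugs_dict.items() if v != 'No mutation detected'}
--     rif = 'Rifampicin' in resistant
--     inh = 'Isoniazid' in resistant
--     pza = 'Pyrazinamide' in resistant
--     emb = 'Ethambutol' in resistant
--     flq = not resistant.isdisjoint(['Fluoroquinolones', 'Levofloxacin', 'Moxifloxacin', 'Ofloxacin', 'Ciprofloxacin'])
--     ack = not resistant.isdisjoint(['Amikacin', 'Capreomycin', 'Kanamycin', 'Streptomycin'])
--     if rif and inh:
--         return 'Extensive drug-resistance predicted' if flq and ack else 'Multi-drug resistance predicted'
--     first_line = rif + inh + pza + emb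
--     if first_line >= 2:
--         return 'Poly-resistance predicted'
--     if first_line == 1:
--         return 'Mono-resistance predicted'
--     return 'No drug resistance predicted'
-- ===== Notes on version B (the rewrite author's own statement) =====
-- stated objective: simpler
-- what changed: B replaces A's integer score (3 per RIF/INH, 1 per PZA/EMB) and range-based dispatch by a set of resistant drugs and direct boolean logic: rif-and-inh selects the MDR/XDR bucket (XDR iff a fluoroquinolone and an aminoglycoside are also resistant), otherwise the first-line count >= 2 / == 1 / == 0 gives poly / mono / none; the dict lookup inside the loop disappears.
import Mathlib
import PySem

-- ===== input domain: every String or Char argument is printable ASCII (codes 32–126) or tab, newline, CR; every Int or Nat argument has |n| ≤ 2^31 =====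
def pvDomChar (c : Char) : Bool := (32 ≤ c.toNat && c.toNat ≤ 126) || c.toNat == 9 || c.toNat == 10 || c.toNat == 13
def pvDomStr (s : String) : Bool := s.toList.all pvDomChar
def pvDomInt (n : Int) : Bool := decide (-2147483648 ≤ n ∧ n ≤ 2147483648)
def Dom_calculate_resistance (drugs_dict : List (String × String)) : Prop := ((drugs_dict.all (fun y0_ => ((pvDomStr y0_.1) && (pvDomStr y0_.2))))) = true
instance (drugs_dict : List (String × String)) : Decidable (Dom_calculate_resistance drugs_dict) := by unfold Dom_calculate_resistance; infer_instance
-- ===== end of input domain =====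

-- B replaces A's integer score and range dispatch by a resistant-drug set and direct boolean
-- category logic (objective: simpler); equal return value on every dict-like input (distinct keys).


-- ===== PORT A =====
def pvFlqlistA : List String := ["Fluoroquinolones", "Levofloxacin", "Moxifloxacin", "Ofloxacin", "Ciprofloxacin"]
def pvAckslistA : List String := ["Amikacin", "Capreomycin", "Kanamycin", "Streptomycin"]

-- 'for d in drugs_dict' iterates the keys; 'drugs_dict[d]' is the dict lookup of that key
-- (the key comes from the dict itself, so the lookup's "" default is never used).
def calculate_resistance (drugs_dict : List (String × String)) : String :=
  let st := drugs_dict.foldl (fun (st : Int × Bool × Bool) p =>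
      if (PySem.Dict.mk drugs_dict).getD p.1 "" ≠ "No mutation detected" then
        if p.1 ∈ pvFlqlistA then (st.1, true, st.2.2)
        else if p.1 ∈ pvAckslistA then (st.1, st.2.1, true)
        else if p.1 ∈ (["Rifampicin", "Isoniazid"] : List String) then (st.1 + 3, st.2.1, st.2.2)
        else if p.1 ∈ (["Pyrazinamide", "Ethambutol"] : List String) then (st.1 + 1, st.2.1, st.2.2)
        else st
      else st) ((0 : Int), false, false)
  let score := st.1
  let flq := st.2.1
  let ack := st.2.2
  if score = 1 ∨ score = 3 then "Mono-resistance predicted"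
  else if score = 2 ∨ score ∈ PySem.List.pyRange 4 6 1 then "Poly-resistance predicted"
  else if score ∈ PySem.List.pyRange 6 9 1 then
    (if flq && ack then "Extensive drug-resistance predicted"
     else "Multi-drug resistance predicted")
  else "No drug resistance predicted"

-- ===== PORT B =====
def pvFlqlistB : List String := ["Fluoroquinolones", "Levofloxacin", "Moxifloxacin", "Ofloxacin", "Ciprofloxacin"]
def pvAckslistB : List String := ["Amikacin", "Capreomycin", "Kanamycin", "Streptomycin"]

def calculate_resistance_alt (drugs_dict : List (String × String)) : String :=
  let resistant : PySem.Set String :=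
    PySem.Set.ofList ((drugs_dict.filter (fun p => p.2 != "No mutation detected")).map Prod.fst)
  let rif := PySem.Set.contains resistant "Rifampicin"
  let inh := PySem.Set.contains resistant "Isoniazid"
  let pza := PySem.Set.contains resistant "Pyrazinamide"
  let emb := PySem.Set.contains resistant "Ethambutol"
  let flq := !(PySem.Set.isdisjoint resistant pvFlqlistB)
  let ack := !(PySem.Set.isdisjoint resistant pvAckslistB)
  if rif && inh then
    (if flq && ack then "Extensive drug-resistance predicted"
     else "Multi-drug resistance predicted")
  else
    let first_line : Int := (if rif then 1 else 0) + (if inh then 1 else 0) +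
      (if pza then 1 else 0) + (if emb then 1 else 0)
    if first_line ≥ 2 then "Poly-resistance predicted"
    else if first_line = 1 then "Mono-resistance predicted"
    else "No drug resistance predicted"

-- ===== PRECONDITION & SPEC =====
-- The Python argument is a dict, whose keys are necessarily distinct; Pre_ states exactly that
-- for the association-list model (it excludes no input representing a Python dict).
def Pre_calculate_resistance (drugs_dict : List (String × String)) : Prop :=
  (drugs_dict.map Prod.fst).Nodup
instance (drugs_dict : List (String × String)) : Decidable (Pre_calculate_resistance drugs_dict) := by
  unfold Pre_calculate_resistance; infer_instance

def pvWitness_calculate_resistance : (List (String × String)) :=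
  [("Rifampicin", "S450L"), ("Isoniazid", "No mutation detected")]

def Spec_calculate_resistance (drugs_dict : List (String × String)) (out : String) : Prop := out = calculate_resistance_alt drugs_dict
instance (drugs_dict : List (String × String)) (out : String) : Decidable (Spec_calculate_resistance drugs_dict out) := by unfold Spec_calculate_resistance; infer_instance

-- ===== CLAIM (what is proved, stated in full; the proofs are below) =====
def Claim_equal_calculate_resistance : Prop := ∀ (drugs_dict : List (String × String)), Dom_calculate_resistance drugs_dict → Pre_calculate_resistance drugs_dict → Spec_calculate_resistance drugs_dict (calculate_resistance drugs_dict)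

-- ===== LEMMAS AND PROOFS =====

/-- Whether one dict entry counts as resistant. -/
def pvRes (p : String × String) : Bool := p.2 != "No mutation detected"

/-- Some resistant entry has key `x`. -/
def pvHas (l : List (String × String)) (x : String) : Bool :=
  l.any (fun p => p.1 == x && pvRes p)

/-- Some resistant entry has a key in `names`. -/
def pvAnyIn (l : List (String × String)) (names : List String) : Bool :=
  l.any (fun p => decide (p.1 ∈ names) && pvRes p)

def pvB2I (b : Bool) : Int := if b then 1 else 0

/-- Score contribution of one entry, mirroring A's branch structure. -/
def pvW (p : String × String) : Int :=
  if pvRes p then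
    if p.1 ∈ pvFlqlistA then 0
    else if p.1 ∈ pvAckslistA then 0
    else if p.1 ∈ (["Rifampicin", "Isoniazid"] : List String) then 3
    else if p.1 ∈ (["Pyrazinamide", "Ethambutol"] : List String) then 1
    else 0
  else 0

/-- A's loop body once the dict lookup has been replaced by the pair's own value. -/
def pvG (st : Int × Bool × Bool) (p : String × String) : Int × Bool × Bool :=
  if pvRes p = true then
    if p.1 ∈ pvFlqlistA then (st.1, true, st.2.2)
    else if p.1 ∈ pvAckslistA then (st.1, st.2.1, true)
    else if p.1 ∈ (["Rifampicin", "Isoniazid"] : List String) then (st.1 + 3, st.2.1, st.2.2)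
    else if p.1 ∈ (["Pyrazinamide", "Ethambutol"] : List String) then (st.1 + 1, st.2.1, st.2.2)
    else st
  else st

theorem pvFlq_not_acks (x : String) (h : x ∈ pvFlqlistA) : x ∉ pvAckslistA := by
  simp only [pvFlqlistA, List.mem_cons, List.not_mem_nil, or_false] at h
  rcases h with h | h | h | h | h <;> subst h <;> decide

theorem pvFold (l : List (String × String)) (s : Int) (fl ak : Bool) :
    l.foldl pvG (s, fl, ak) =
      (s + (l.map pvW).sum, fl || pvAnyIn l pvFlqlistA, ak || pvAnyIn l pvAckslistA) := by
  induction l generalizing s fl ak with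
  | nil => simp [pvAnyIn]
  | cons p t ih =>
    have hany : ∀ names, pvAnyIn (p :: t) names =
        ((decide (p.1 ∈ names) && pvRes p) || pvAnyIn t names) := by
      intro names; simp [pvAnyIn]
    simp only [List.foldl_cons, List.map_cons, List.sum_cons, hany]
    by_cases hr : pvRes p = true
    · by_cases h1 : p.1 ∈ pvFlqlistA
      · have h2 := pvFlq_not_acks p.1 h1
        rw [pvG, if_pos hr, if_pos h1, ih]
        simp [pvW, hr, h1, h2, add_comm]
      · by_cases h2 : p.1 ∈ pvAckslistA
        · rw [pvG, if_pos hr, if_neg h1, if_pos h2, ih]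
          simp [pvW, hr, h1, h2, add_comm]
        · by_cases h3 : p.1 ∈ (["Rifampicin", "Isoniazid"] : List String)
          · rw [pvG, if_pos hr, if_neg h1, if_neg h2, if_pos h3, ih]
            simp [pvW, hr, h1, h2, h3, add_comm, add_left_comm]
          · by_cases h4 : p.1 ∈ (["Pyrazinamide", "Ethambutol"] : List String)
            · rw [pvG, if_pos hr, if_neg h1, if_neg h2, if_neg h3, if_pos h4, ih]
              simp [pvW, hr, h1, h2, h3, h4, add_comm, add_left_comm]
            · rw [pvG, if_pos hr, if_neg h1, if_neg h2, if_neg h3, if_neg h4, ih]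
              simp [pvW, hr, h1, h2, h3, h4]
    · rw [pvG, if_neg hr, ih]
      simp [pvW, hr]

theorem pvHas_not_key (t : List (String × String)) (x : String)
    (h : x ∉ t.map Prod.fst) : pvHas t x = false := by
  simp only [pvHas, List.any_eq_false]
  intro p hp
  simp only [Bool.and_eq_true, beq_iff_eq, not_and]
  intro hx
  exact absurd (List.mem_map.mpr ⟨p, hp, hx⟩) h

theorem pvSum (l : List (String × String)) (hnd : (l.map Prod.fst).Nodup) :
    (l.map pvW).sum =
      3 * pvB2I (pvHas l "Rifampicin") + 3 * pvB2I (pvHas l "Isoniazid") +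
        pvB2I (pvHas l "Pyrazinamide") + pvB2I (pvHas l "Ethambutol") := by
  induction l with
  | nil => simp [pvHas, pvB2I]
  | cons p t ih =>
    simp only [List.map_cons, List.nodup_cons] at hnd
    obtain ⟨hnotin, hndt⟩ := hnd
    have hcons : ∀ x, pvHas (p :: t) x = ((p.1 == x && pvRes p) || pvHas t x) := by
      intro x; simp [pvHas]
    simp only [List.map_cons, List.sum_cons, hcons, ih hndt]
    by_cases hr : pvRes p = true
    · by_cases hR : p.1 = "Rifampicin"
      · rw [pvHas_not_key t "Rifampicin" (hR ▸ hnotin)]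
        simp [pvW, pvB2I, hr, hR, pvFlqlistA, pvAckslistA]; ring
      · by_cases hI : p.1 = "Isoniazid"
        · rw [pvHas_not_key t "Isoniazid" (hI ▸ hnotin)]
          simp [pvW, pvB2I, hr, hI, pvFlqlistA, pvAckslistA]; ring
        · by_cases hP : p.1 = "Pyrazinamide"
          · rw [pvHas_not_key t "Pyrazinamide" (hP ▸ hnotin)]
            simp [pvW, pvB2I, hr, hP, pvFlqlistA, pvAckslistA]; ring
          · by_cases hE : p.1 = "Ethambutol"
            · rw [pvHas_not_key t "Ethambutol" (hE ▸ hnotin)]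
              simp [pvW, pvB2I, hr, hE, pvFlqlistA, pvAckslistA]; ring
            · have b1 : (p.1 == "Rifampicin") = false := by simp [hR]
              have b2 : (p.1 == "Isoniazid") = false := by simp [hI]
              have b3 : (p.1 == "Pyrazinamide") = false := by simp [hP]
              have b4 : (p.1 == "Ethambutol") = false := by simp [hE]
              simp [pvW, hr, hR, hI, hP, hE, b1, b2, b3, b4]
    · simp [pvW, hr]

theorem pvContains (l : List (String × String)) (x : String) :
    PySem.Set.contains
        (PySem.Set.ofList ((l.filter (fun p => p.2 != "No mutation detected")).map Prod.fst)) x =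
      pvHas l x := by
  rw [Bool.eq_iff_iff]
  simp only [PySem.Set.contains_iff, PySem.Set.mem_ofList, List.mem_map, List.mem_filter,
    pvHas, pvRes, List.any_eq_true, Bool.and_eq_true, beq_iff_eq]
  constructor
  · rintro ⟨p, ⟨hp, hres⟩, hfst⟩
    exact ⟨p, hp, hfst, hres⟩
  · rintro ⟨p, hp, hfst, hres⟩
    exact ⟨p, ⟨hp, hres⟩, hfst⟩

theorem pvNotDisjoint (l : List (String × String)) (names : List String) :
    (!(PySem.Set.isdisjoint
        (PySem.Set.ofList ((l.filter (fun p => p.2 != "No mutation detected")).map Prod.fst))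
        names)) = pvAnyIn l names := by
  rw [Bool.eq_iff_iff, Bool.not_eq_true', Bool.eq_false_iff, Ne, PySem.Set.isdisjoint_iff]
  simp only [PySem.Set.mem_ofList, List.mem_map, List.mem_filter, pvAnyIn, pvRes,
    List.any_eq_true, Bool.and_eq_true, decide_eq_true_eq]
  constructor
  · intro h
    push Not at h
    obtain ⟨x, ⟨p, ⟨hp, hres⟩, hfst⟩, hx⟩ := h
    exact ⟨p, hp, hfst ▸ hx, hres⟩
  · rintro ⟨p, hp, hmem, hres⟩ h
    exact h p.1 ⟨p, ⟨hp, hres⟩, rfl⟩ hmem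

-- ===== VERDICT (by name: the statement is the Claim_ definition above) =====
theorem calculate_resistance_spec : Claim_equal_calculate_resistance := by
  intro l _ pre
  unfold Spec_calculate_resistance
  have hnd : (l.map Prod.fst).Nodup := pre
  have hkeys : (PySem.Dict.mk l).keys.Nodup := by simpa [PySem.Dict.keys] using hnd
  have hflqB : pvFlqlistB = pvFlqlistA := rfl
  have hackB : pvAckslistB = pvAckslistA := rfl
  have hfold : l.foldl (fun (st : Int × Bool × Bool) p =>
      if (PySem.Dict.mk l).getD p.1 "" ≠ "No mutation detected" then
        if p.1 ∈ pvFlqlistA then (st.1, true, st.2.2)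
        else if p.1 ∈ pvAckslistA then (st.1, st.2.1, true)
        else if p.1 ∈ (["Rifampicin", "Isoniazid"] : List String) then (st.1 + 3, st.2.1, st.2.2)
        else if p.1 ∈ (["Pyrazinamide", "Ethambutol"] : List String) then (st.1 + 1, st.2.1, st.2.2)
        else st
      else st) ((0 : Int), false, false) = l.foldl pvG ((0 : Int), false, false) := by
    apply PySem.List.foldl_congr_mem
    intro acc p hp
    have hget : (PySem.Dict.mk l).getD p.1 "" = p.2 :=
      PySem.Dict.getD_of_mem_items (d := PySem.Dict.mk l) (by simpa using hp) hkeys ""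
    rw [hget, pvG]
    by_cases h : p.2 = "No mutation detected" <;> simp [pvRes, h]
  rw [calculate_resistance, calculate_resistance_alt]
  simp only [hflqB, hackB, hfold, pvFold, pvContains, pvNotDisjoint, zero_add]
  rw [pvSum l hnd]
  simp only [Bool.false_or]
  cases hR : pvHas l "Rifampicin" <;> cases hI : pvHas l "Isoniazid" <;>
    cases hP : pvHas l "Pyrazinamide" <;> cases hE : pvHas l "Ethambutol" <;>
    cases hF : pvAnyIn l pvFlqlistA <;> cases hK : pvAnyIn l pvAckslistA <;>
    norm_num [pvB2I, PySem.List.mem_pyRange_one]
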